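-- pv_equiv track=rewrite | github.com/OscarTsao/bitoguard-hackathon | bitoguard_core/official/common.py | _unique_feature_names
-- ===== SOURCE A (Python) =====
-- def _unique_feature_names(columns: list[str]) -> list[str]:
--     seen: dict[str, int] = {}
--     unique: list[str] = []
--     for column in columns:
--         count = seen.get(column, 0)
--         if count == 0:
--             unique.append(column)
--         else:
--             unique.append(f"{column}_{count}")
--         seen[column] = count + 1
--     return unique
-- ===== SOURCE B (Python) =====
-- def _unique_feature_names(columns: list[str]) -> list[str]:
--     remaining = {}
--     for column in columns:
--         remaining[column] = remaining.get(column, 0) + 1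
--     out = []
--     for column in reversed(columns):
--         remaining[column] -= 1
--         k = remaining[column]
--         out.append(column if k == 0 else f"{column}_{k}")
--     out.reverse()
--     return out
-- ===== Notes on version B (the rewrite author's own statement) =====
-- stated objective: alternative
-- what changed: Instead of A's single forward pass with a running-count dict, B counts all occurrences first and then builds the output back-to-front, walking the list in reverse while decrementing the counts (the decremented count equals A's running count).
import Mathlib
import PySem

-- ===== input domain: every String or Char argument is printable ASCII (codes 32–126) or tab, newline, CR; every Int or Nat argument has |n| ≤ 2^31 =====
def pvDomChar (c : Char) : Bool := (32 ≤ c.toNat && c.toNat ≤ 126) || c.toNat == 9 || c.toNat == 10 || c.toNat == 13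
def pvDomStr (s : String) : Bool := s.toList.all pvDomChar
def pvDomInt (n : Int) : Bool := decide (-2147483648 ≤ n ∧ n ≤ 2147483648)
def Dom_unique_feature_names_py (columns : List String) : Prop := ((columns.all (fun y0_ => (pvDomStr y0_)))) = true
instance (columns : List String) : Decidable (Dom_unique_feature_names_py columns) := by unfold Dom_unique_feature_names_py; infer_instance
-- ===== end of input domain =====

-- B builds the result back-to-front: it counts all occurrences first, then walks the list in
-- reverse, decrementing the counts (the decremented count equals A's running count); same cost as A.


-- ===== PORT A =====
-- one iteration of A's loop: state = (seen, unique)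
def uniqueStepA (s : PySem.Dict String Int × List String) (column : String) :
    PySem.Dict String Int × List String :=
  let count := s.1.getD column 0
  let unique := if count == 0 then s.2 ++ [column]
                else s.2 ++ [column ++ "_" ++ PySem.Int.toStr count]
  (s.1.insert column (count + 1), unique)

def unique_feature_names_py (columns : List String) : List String :=
  (columns.foldl uniqueStepA (PySem.Dict.empty, [])).2

-- ===== PORT B =====
-- one iteration of B's reversed loop: state = (remaining, out).
-- 'remaining[column] -= 1' is ported as getD-then-insert: exact, since the first pass put every
-- element of columns into remaining, so the key is always present here.
def uniqueStepB (s : PySem.Dict String Int × List String) (column : String) :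
    PySem.Dict String Int × List String :=
  let k := s.1.getD column 0 - 1
  (s.1.insert column k,
   s.2 ++ [if k == 0 then column else column ++ "_" ++ PySem.Int.toStr k])

def unique_feature_names_py_alt (columns : List String) : List String :=
  let remaining := columns.foldl (fun d column => d.insert column (d.getD column 0 + 1))
                     PySem.Dict.empty
  let out := (columns.reverse.foldl uniqueStepB (remaining, [])).2
  out.reverse

-- ===== PRECONDITION & SPEC =====
def Spec_unique_feature_names_py (columns : List String) (out : List String) : Prop := out = unique_feature_names_py_alt columns
instance (columns : List String) (out : List String) : Decidable (Spec_unique_feature_names_py columns out) := by unfold Spec_unique_feature_names_py; infer_instance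

-- ===== CLAIM (what is proved, stated in full; the proofs are below) =====
def Claim_equal_unique_feature_names_py : Prop := ∀ (columns : List String), Dom_unique_feature_names_py columns → Spec_unique_feature_names_py columns (unique_feature_names_py columns)

-- ===== LEMMAS AND PROOFS =====

-- the label both programs attach to an occurrence whose running count (earlier duplicates) is k
def pvLab (k : Int) (c : String) : String :=
  if k == 0 then c else c ++ "_" ++ PySem.Int.toStr k

-- the intended output for the elements of rest, given that pref was already emitted
def pvLabels (pref : List String) : List String → List String
  | [] => []
  | c :: rest => pvLab (pref.count c) c :: pvLabels (pref ++ [c]) rest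

theorem pvLabels_snoc (rest : List String) : ∀ (pref : List String) (c : String),
    pvLabels pref (rest ++ [c]) = pvLabels pref rest ++ [pvLab ((pref ++ rest).count c) c] := by
  induction rest with
  | nil => intro pref c; simp [pvLabels]
  | cons x rest ih =>
      intro pref c
      simp only [List.cons_append, pvLabels, ih (pref ++ [x]) c, List.append_assoc,
        List.nil_append]

-- A's loop invariant: if seen records the counts of the emitted prefix, the loop appends pvLabels
theorem foldlA_eq_labels :
    ∀ (rest pref : List String) (d : PySem.Dict String Int) (u : List String),
      (∀ c : String, d.getD c 0 = (pref.count c : Int)) →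
      (rest.foldl uniqueStepA (d, u)).2 = u ++ pvLabels pref rest := by
  intro rest
  induction rest with
  | nil => intro pref d u _; simp [pvLabels]
  | cons c rest ih =>
      intro pref d u hd
      rw [List.foldl_cons]
      have hstep : uniqueStepA (d, u) c =
          (d.insert c ((pref.count c : Int) + 1), u ++ [pvLab (pref.count c) c]) := by
        simp only [uniqueStepA, hd c, pvLab]
        split <;> rfl
      rw [hstep, ih (pref ++ [c])]
      · simp [pvLabels]
      · intro x
        by_cases hx : x = c
        · subst hx
          rw [PySem.Dict.getD_insert_self]
          simp [List.count_append]
        · rw [PySem.Dict.getD_insert_of_ne _ _ _ hx, hd x]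
          have hcx : List.count x (pref ++ [c]) = List.count x pref := by
            simp [List.count_append, List.count_singleton]
            exact fun h => hx h.symm
          rw [hcx]

-- B's loop invariant: if remaining records the counts of the not-yet-emitted prefix, the reversed
-- loop appends the reversed pvLabels of that prefix
theorem foldlB_eq_labels (pre : List String) :
    ∀ (d : PySem.Dict String Int) (out : List String),
      (∀ c : String, d.getD c 0 = (pre.count c : Int)) →
      (pre.reverse.foldl uniqueStepB (d, out)).2 = out ++ (pvLabels [] pre).reverse := by
  induction pre using List.reverseRecOn with
  | nil => intro d out _; simp [pvLabels]
  | append_singleton pre c ih =>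
      intro d out hd
      rw [List.reverse_append, List.reverse_singleton, List.singleton_append, List.foldl_cons]
      have hk : d.getD c 0 - 1 = (pre.count c : Int) := by
        rw [hd c]; simp [List.count_append]
      have hstep : uniqueStepB (d, out) c =
          (d.insert c (pre.count c : Int), out ++ [pvLab (pre.count c) c]) := by
        simp only [uniqueStepB, hk, pvLab]
      rw [hstep, ih]
      · rw [pvLabels_snoc, List.nil_append, List.reverse_append, List.reverse_singleton,
          List.singleton_append, List.append_assoc, List.singleton_append]
      · intro x
        by_cases hx : x = c
        · subst hx; rw [PySem.Dict.getD_insert_self]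
        · rw [PySem.Dict.getD_insert_of_ne _ _ _ hx, hd x]
          have hcx : List.count x (pre ++ [c]) = List.count x pre := by
            simp [List.count_append, List.count_singleton]
            exact fun h => hx h.symm
          rw [hcx]

-- B unfolded: the counting pass is Counter, so the reversed pass emits (pvLabels [] columns).reverse
theorem altB_eq_labels (columns : List String) :
    unique_feature_names_py_alt columns = pvLabels [] columns := by
  show ((columns.reverse.foldl uniqueStepB
      (columns.foldl (fun d column => d.insert column (d.getD column 0 + 1)) PySem.Dict.empty,
        [])).2).reverse = _
  rw [PySem.Dict.foldl_insert_getD_add_one_eq_counter,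
    foldlB_eq_labels columns (PySem.Dict.counter columns) []
      (fun c => by rw [PySem.Dict.getD_counter])]
  simp

-- ===== VERDICT (by name: the statement is the Claim_ definition above) =====
theorem unique_feature_names_py_spec : Claim_equal_unique_feature_names_py := by
  intro columns _
  show unique_feature_names_py columns = unique_feature_names_py_alt columns
  unfold unique_feature_names_py
  rw [foldlA_eq_labels columns [] PySem.Dict.empty [] (fun c => rfl), altB_eq_labels]
  simp
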